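-- pv_equiv track=rewrite | github.com/apache/iggy | scripts/ci/affected-crates.py | map_files_to_crates
-- ===== SOURCE A (Python) =====
-- from collections import defaultdict
--
-- def map_files_to_crates(changed_files, crate_paths):
--     """
--     Map changed files to the crates they belong to.
--
--     Returns:
--         dict of crate_name -> list of changed files in that crate
--     """
--     affected = defaultdict(list)
--
--     # Sort crate paths longest-first for most-specific match
--     sorted_crates = sorted(crate_paths.items(), key=lambda x: len(x[1]), reverse=True)
--
--     for filepath in changed_files:
--         for crate_name, crate_dir in sorted_crates:
--             if filepath.startswith(crate_dir + "/") or filepath == crate_dir: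
--                 affected[crate_name].append(filepath)
--                 break
--
--     return affected
-- ===== SOURCE B (Python) =====
-- def map_files_to_crates(changed_files, crate_paths):
--     """
--     Map changed files to the crates they belong to.
--
--     Faster: index crate_dir -> crate_name once, then for each file probe its
--     ancestor prefixes longest-first (cut at '/' positions) instead of scanning
--     every crate per file.
--     """
--     dir_to_name = {}
--     for name, d in crate_paths.items():
--         if d not in dir_to_name:
--             dir_to_name[d] = name
--     affected = {}
--     for fp in changed_files:
--         cuts = [i for i in range(len(fp)) if fp[i] == '/']
--         for c in [len(fp)] + cuts[::-1]:
--             name = dir_to_name.get(fp[:c])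
--             if name is not None:
--                 affected[name] = affected.get(name, []) + [fp]
--                 break
--     return affected
-- ===== Notes on version B (the rewrite author's own statement) =====
-- stated objective: faster
-- what changed: Instead of sorting all crates by dir length and scanning every crate per file, B builds a crate_dir->name hash index once and probes each file's ancestor prefixes (cuts at '/' positions) longest-first.
import Mathlib
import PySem

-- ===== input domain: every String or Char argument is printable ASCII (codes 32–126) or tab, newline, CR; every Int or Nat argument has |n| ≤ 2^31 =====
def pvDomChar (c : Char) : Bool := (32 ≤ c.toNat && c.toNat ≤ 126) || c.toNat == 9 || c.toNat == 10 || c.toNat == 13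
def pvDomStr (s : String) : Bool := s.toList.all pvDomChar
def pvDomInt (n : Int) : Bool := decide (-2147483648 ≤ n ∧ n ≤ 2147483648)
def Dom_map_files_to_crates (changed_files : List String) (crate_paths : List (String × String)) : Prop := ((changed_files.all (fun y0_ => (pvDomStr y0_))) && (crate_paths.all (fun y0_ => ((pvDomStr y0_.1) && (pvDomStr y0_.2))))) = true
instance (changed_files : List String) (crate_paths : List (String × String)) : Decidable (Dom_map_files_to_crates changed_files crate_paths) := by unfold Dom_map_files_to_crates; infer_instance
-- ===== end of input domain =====

-- B replaces A's per-file scan over all length-sorted crates by a crate_dir->name index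
-- built once, probing each file's ancestor prefixes longest-first (objective: faster).

-- ===== PORT A =====
def map_files_to_crates (changed_files : List String) (crate_paths : List (String × String)) : List (String × List String) :=
  let sorted_crates := PySem.List.sorted crate_paths (fun x => PySem.Str.len x.2) true
  (changed_files.foldl (fun (affected : PySem.Dict String (List String)) filepath =>
      match sorted_crates.find? (fun pr => PySem.Str.startswith filepath (pr.2 ++ "/") || filepath == pr.2) with
      | some pr => affected.modify pr.1 [] (fun l => l ++ [filepath])
      | none => affected) PySem.Dict.empty).items

-- ===== PORT B =====
def map_files_to_crates_alt (changed_files : List String) (crate_paths : List (String × String)) : List (String × List String) :=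
  let dirToName : PySem.Dict String String :=
    crate_paths.foldl (fun m pr => if m.contains pr.2 then m else m.insert pr.2 pr.1) PySem.Dict.empty
  (changed_files.foldl (fun (affected : PySem.Dict String (List String)) fp =>
      let cuts := (PySem.List.pyRange 0 (PySem.Str.len fp) 1).filter (fun i => PySem.Str.pyGet? fp i == some '/')
      let order := PySem.Str.len fp :: cuts.reverse
      match order.findSome? (fun c => dirToName.get? (PySem.Str.slice fp none (some c))) with
      | some name => affected.insert name (affected.getD name [] ++ [fp])
      | none => affected) PySem.Dict.empty).items

-- ===== PRECONDITION & SPEC =====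
def Spec_map_files_to_crates (changed_files : List String) (crate_paths : List (String × String)) (out : List (String × List String)) : Prop := out = map_files_to_crates_alt changed_files crate_paths
instance (changed_files : List String) (crate_paths : List (String × String)) (out : List (String × List String)) : Decidable (Spec_map_files_to_crates changed_files crate_paths out) := by unfold Spec_map_files_to_crates; infer_instance

-- ===== CLAIM (what is proved, stated in full; the proofs are below) =====
def Claim_equal_map_files_to_crates : Prop := ∀ (changed_files : List String) (crate_paths : List (String × String)), Dom_map_files_to_crates changed_files crate_paths → Spec_map_files_to_crates changed_files crate_paths (map_files_to_crates changed_files crate_paths)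

-- ===== LEMMAS AND PROOFS =====

-- A's per-file match predicate
def pvMatchA (fp : String) (pr : String × String) : Bool :=
  PySem.Str.startswith fp (pr.2 ++ "/") || fp == pr.2

-- the candidate cut positions of fp, longest first (whole string, then each '/' position descending)
def pvOrderN (fp : String) : List Nat :=
  fp.toList.length :: ((List.range fp.toList.length).filter (fun i => fp.toList[i]? == some '/')).reverse

lemma pvOrderN_le (fp : String) : ∀ n ∈ pvOrderN fp, n ≤ fp.toList.length := by
  intro n hn
  simp only [pvOrderN, List.mem_cons, List.mem_reverse, List.mem_filter, List.mem_range] at hn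
  rcases hn with h | ⟨h, _⟩ <;> omega

lemma pvOrderN_desc (fp : String) : (pvOrderN fp).Pairwise (fun a b => b < a) := by
  unfold pvOrderN
  refine List.Pairwise.cons ?_ ?_
  · intro b hb
    simp only [List.mem_reverse, List.mem_filter, List.mem_range] at hb
    exact hb.1
  · rw [List.pairwise_reverse]
    exact (List.pairwise_lt_range).filter _

lemma pvMem_orderN (fp : String) (n : Nat) :
    n ∈ pvOrderN fp ↔ n = fp.toList.length ∨ (n < fp.toList.length ∧ fp.toList[n]? = some '/') := by
  simp [pvOrderN, List.mem_filter, List.mem_range]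

-- a prefix followed by '/' is a take at a '/' position
lemma pvSlashPrefix (d t : List Char) :
    (d ++ ['/']) <+: t ↔ (d.length < t.length ∧ t[d.length]? = some '/' ∧ d = t.take d.length) := by
  constructor
  · rintro ⟨u, hu⟩
    subst hu
    refine ⟨by simp, ?_, ?_⟩
    · rw [List.append_assoc, List.getElem?_append_right (le_refl _)]
      simp
    · rw [List.append_assoc, List.take_left]
  · rintro ⟨hlt, hget, htake⟩
    refine ⟨t.drop (d.length + 1), ?_⟩
    conv_rhs => rw [← List.take_append_drop d.length t]
    rw [← htake, List.append_assoc]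
    congr 1
    have hc : t[d.length] = '/' := by
      have := List.getElem?_eq_getElem hlt
      rw [hget] at this
      exact Option.some_injective _ this.symm
    symm
    rw [List.drop_eq_getElem_cons hlt, hc]
    rfl

-- characterisation of A's match predicate
lemma pvMatchA_iff (fp : String) (pr : String × String) :
    pvMatchA fp pr = true ↔ ∃ n ∈ pvOrderN fp, pr.2.toList = fp.toList.take n := by
  unfold pvMatchA
  rw [Bool.or_eq_true, PySem.Str.startswith_eq, PySem.Chars.startswith_iff, beq_iff_eq]
  have htl : (pr.2 ++ "/").toList = pr.2.toList ++ ['/'] := by simp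
  rw [htl, pvSlashPrefix]
  constructor
  · rintro (⟨hlt, hget, htake⟩ | heq)
    · exact ⟨pr.2.toList.length, (pvMem_orderN fp _).mpr (Or.inr ⟨hlt, hget⟩), htake⟩
    · exact ⟨fp.toList.length, (pvMem_orderN fp _).mpr (Or.inl rfl), by simp [heq]⟩
  · rintro ⟨n, hn, htake⟩
    rcases (pvMem_orderN fp n).mp hn with rfl | ⟨hlt, hget⟩
    · right
      apply String.toList_inj.mp
      simp [htake]
    · left
      have hlen : pr.2.toList.length = n := by rw [htake, List.length_take]; omega
      exact ⟨by omega, by rw [hlen]; exact hget, by rw [hlen]; exact htake⟩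

lemma pvMatch_len (fp : String) (pr : String × String) {n : Nat} (hn : n ∈ pvOrderN fp)
    (h : pr.2.toList = fp.toList.take n) : pr.2.toList.length = n := by
  have hle : n ≤ fp.toList.length := pvOrderN_le fp n hn
  rw [h, List.length_take]; omega

-- find? on a strictly descending list returns the maximum satisfying element
lemma pvFind?_desc_max (l : List Nat) (p : Nat → Bool) (a : Nat)
    (hl : l.Pairwise (fun a b => b < a)) (ha : l.find? p = some a) :
    ∀ b ∈ l, p b = true → b ≤ a := by
  induction l with
  | nil => simp at ha
  | cons x t ih =>
    rcases List.pairwise_cons.mp hl with ⟨hx, ht⟩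
    by_cases hp : p x = true
    · rw [List.find?_cons_of_pos hp] at ha
      cases ha
      intro b hb _
      rcases List.mem_cons.mp hb with rfl | hb
      · exact le_refl _
      · exact le_of_lt (hx b hb)
    · rw [List.find?_cons_of_neg hp] at ha
      intro b hb hpb
      rcases List.mem_cons.mp hb with rfl | hb
      · exact absurd hpb hp
      · exact ih ht ha b hb hpb

-- findSome? through find?
lemma pvFindSome?_eq (l : List Nat) (f : Nat → Option String) :
    l.findSome? f = (l.find? (fun x => (f x).isSome)).bind f := by
  induction l with
  | nil => rfl
  | cons x t ih =>
    rw [List.findSome?_cons]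
    cases h : f x with
    | some v => rw [List.find?_cons_of_pos (by simp [h])]; simp [h]
    | none => rw [List.find?_cons_of_neg (by simp [h])]; simpa [h] using ih

-- first p-element of a key-descending list = first q-element, when q is the max-key class of p
lemma pvFind?_class (key : (String × String) → Int) (p q : (String × String) → Bool) (K : Int)
    (L : List (String × String))
    (hPW : L.Pairwise (fun a b => key b ≤ key a))
    (h1 : ∀ a, q a = true → p a = true)
    (h5 : ∀ a, q a = true → key a = K)
    (h2 : ∀ a ∈ L, p a = true → key a ≤ K)
    (h3 : ∀ a ∈ L, p a = true → key a = K → q a = true)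
    (h4 : ∃ a ∈ L, q a = true) :
    L.find? p = L.find? q := by
  induction L with
  | nil => rfl
  | cons x t ih =>
    rcases List.pairwise_cons.mp hPW with ⟨hx, ht⟩
    by_cases hq : q x = true
    · rw [List.find?_cons_of_pos (h1 x hq), List.find?_cons_of_pos hq]
    · by_cases hp : p x = true
      · exfalso
        have hkx : key x < K := by
          have := h2 x (List.mem_cons_self) hp
          rcases lt_or_eq_of_le this with h | h
          · exact h
          · exact absurd (h3 x List.mem_cons_self hp h) hq
        rcases h4 with ⟨a, ha, hqa⟩
        rcases List.mem_cons.mp ha with rfl | ha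
        · exact hq hqa
        · have := hx a ha
          have := h5 a hqa
          omega
      · rw [List.find?_cons_of_neg hp, List.find?_cons_of_neg hq]
        refine ih ht (fun a ha => h2 a (List.mem_cons_of_mem _ ha)) (fun a ha => h3 a (List.mem_cons_of_mem _ ha)) ?_
        rcases h4 with ⟨a, ha, hqa⟩
        rcases List.mem_cons.mp ha with rfl | ha
        · exact absurd hqa hq
        · exact ⟨a, ha, hqa⟩

-- stable (reverse) insertion preserves descending order
lemma pvInsertBy_pairwise (key : (String × String) → Int) (x : String × String)
    (ys : List (String × String)) (h : ys.Pairwise (fun a b => key b ≤ key a)) :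
    (PySem.List.insertBy (fun a b => decide (key b < key a)) x ys).Pairwise (fun a b => key b ≤ key a) := by
  induction ys with
  | nil => simp [PySem.List.insertBy]
  | cons y t ih =>
    rcases List.pairwise_cons.mp h with ⟨hy, ht⟩
    show (if (decide (key y < key x)) then x :: y :: t else y :: PySem.List.insertBy _ x t).Pairwise _
    split_ifs with hlt
    · simp only [decide_eq_true_eq] at hlt
      refine List.pairwise_cons.mpr ⟨?_, h⟩
      intro b hb
      rcases List.mem_cons.mp hb with rfl | hb
      · exact le_of_lt hlt
      · exact le_trans (hy b hb) (le_of_lt hlt)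
    · simp only [decide_eq_true_eq, not_lt] at hlt
      refine List.pairwise_cons.mpr ⟨?_, ih ht⟩
      intro b hb
      rcases (PySem.List.mem_insertBy _ x b t).mp hb with rfl | hb
      · exact hlt
      · exact hy b hb

-- filtering a key-constant class through one stable insertion: the new element goes last
lemma pvFilter_insertBy (key : (String × String) → Int) (q : (String × String) → Bool)
    (hconst : ∀ a b, q a = true → q b = true → key a = key b)
    (x : String × String) (ys : List (String × String))
    (hys : ys.Pairwise (fun a b => key b ≤ key a)) :
    (PySem.List.insertBy (fun a b => decide (key b < key a)) x ys).filter q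
      = ys.filter q ++ (if q x then [x] else []) := by
  induction ys with
  | nil =>
    show List.filter q [x] = _
    by_cases hq : q x <;> simp [hq]
  | cons y t ih =>
    rcases List.pairwise_cons.mp hys with ⟨hy, ht⟩
    show (if (decide (key y < key x)) then x :: y :: t else y :: PySem.List.insertBy _ x t).filter q = _
    by_cases hlt : key y < key x
    · rw [if_pos (by simpa using hlt)]
      by_cases hq : q x
      · have hnone : (y :: t).filter q = [] := by
          rw [List.filter_eq_nil_iff]
          intro b hb hqb
          have hkb : key b = key x := hconst b x hqb hq
          rcases List.mem_cons.mp hb with rfl | hb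
          · omega
          · have := hy b hb; omega
        rw [List.filter_cons_of_pos hq, hnone, if_pos hq]
        rfl
      · rw [List.filter_cons_of_neg (by simpa using hq), if_neg hq, List.append_nil]
    · rw [if_neg (by simpa using hlt)]
      rw [List.filter_cons, List.filter_cons, ih ht]
      by_cases hqy : q y <;> simp [hqy]

lemma pvFoldl_insertBy_filter (key : (String × String) → Int) (q : (String × String) → Bool)
    (hconst : ∀ a b, q a = true → q b = true → key a = key b) :
    ∀ (xs acc : List (String × String)), acc.Pairwise (fun a b => key b ≤ key a) →
    (xs.foldl (fun acc x => PySem.List.insertBy (fun a b => decide (key b < key a)) x acc) acc).filter q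
      = acc.filter q ++ xs.filter q := by
  intro xs
  induction xs with
  | nil => intro acc _; simp
  | cons x t ih =>
    intro acc hacc
    rw [List.foldl_cons, ih _ (pvInsertBy_pairwise key x acc hacc),
        pvFilter_insertBy key q hconst x acc hacc, List.filter_cons]
    by_cases hq : q x <;> simp [hq]

-- STABILITY: Python's stable sort keeps the relative order of one key-class
lemma pvFilter_sorted_rev (xs : List (String × String)) (key : (String × String) → Int)
    (q : (String × String) → Bool)
    (hconst : ∀ a b, q a = true → q b = true → key a = key b) :
    (PySem.List.sorted xs key true).filter q = xs.filter q := by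
  rw [PySem.List.sorted_rev_eq_foldl_insertBy]
  simpa using pvFoldl_insertBy_filter key q hconst xs [] (by simp)

-- B's dir->name index is first-match lookup on the (name, dir) pairs
lemma pvDirmap_get (cp : List (String × String)) (k : String) :
    ∀ (m : PySem.Dict String String),
    ((cp.foldl (fun m pr => if m.contains pr.2 then m else m.insert pr.2 pr.1) m).get? k)
      = (m.get? k).or ((cp.find? (fun pr => pr.2 == k)).map (·.1)) := by
  induction cp with
  | nil => intro m; simp
  | cons pr t ih =>
    intro m
    rw [List.foldl_cons]
    by_cases hc : m.contains pr.2 = true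
    · rw [if_pos hc, ih m]
      by_cases hk : pr.2 == k
      · have : pr.2 = k := by simpa using hk
        subst this
        have : (m.get? pr.2).isSome := by rw [← PySem.Dict.contains_eq_isSome_get?]; exact hc
        rcases Option.isSome_iff_exists.mp this with ⟨v, hv⟩
        simp [hv]
      · rw [List.find?_cons_of_neg (by simpa using hk)]
    · rw [if_neg hc]
      by_cases hk : pr.2 == k
      · have hkk : pr.2 = k := by simpa using hk
        subst hkk
        rw [ih]
        have hm : m.get? pr.2 = none := by
          have := PySem.Dict.contains_eq_isSome_get? m pr.2
          rw [eq_false_of_ne_true hc] at this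
          simpa using this.symm
        rw [PySem.Dict.get?_insert_self, List.find?_cons_of_pos (by simp), hm]
        simp
      · have hne : k ≠ pr.2 := fun h => hk (by simp [h])
        rw [ih, PySem.Dict.get?_insert_of_ne _ _ hne, List.find?_cons_of_neg (by simpa using hk)]

-- B's order list is the Int image of pvOrderN
lemma pvOrder_eq (fp : String) :
    (PySem.Str.len fp :: ((PySem.List.pyRange 0 (PySem.Str.len fp) 1).filter (fun i => PySem.Str.pyGet? fp i == some '/')).reverse)
      = (pvOrderN fp).map (fun (n : Nat) => (n : Int)) := by
  unfold pvOrderN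
  rw [List.map_cons, PySem.Str.len_eq]
  congr 1
  have h1 : PySem.List.pyRange 0 ((fp.toList.length : Int)) 1 = (List.range fp.toList.length).map (fun (n : Nat) => (n : Int)) := by
    rw [show PySem.List.pyRange 0 ((fp.toList.length : Int)) 1 = PySem.List.pyRange 0 ((fp.toList.length : Int)) from rfl, PySem.List.pyRange_one]
    simp
  rw [h1, List.filter_map, ← List.map_reverse, List.map_reverse, List.map_reverse]
  congr 2
  apply List.filter_congr
  intro i _
  simp [Function.comp]

lemma pvSlice_take (fp : String) (n : Nat) :
    PySem.Str.slice fp none (some (n : Int)) = String.ofList (fp.toList.take n) := by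
  apply String.toList_inj.mp
  rw [PySem.Str.toList_slice]
  simp [PySem.Chars.slice_eq_listSlice, PySem.List.slice_to _ (by positivity : (0:Int) ≤ (n:Int))]

-- MAIN per-file lemma: A's chosen crate name = B's chosen crate name
lemma pvChoice_eq (fp : String) (cp : List (String × String)) :
    ((PySem.List.sorted cp (fun x => PySem.Str.len x.2) true).find? (pvMatchA fp)).map (·.1)
      = (pvOrderN fp).findSome?
          (fun n => (cp.find? (fun pr => pr.2 == String.ofList (fp.toList.take n))).map (·.1)) := by
  set key : (String × String) → Int := fun x => PySem.Str.len x.2 with hkey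
  set qn : Nat → (String × String) → Bool := fun n pr => pr.2 == String.ofList (fp.toList.take n) with hqn
  set L := PySem.List.sorted cp key true with hL
  rw [pvFindSome?_eq]
  have hkeylen : ∀ pr : String × String, key pr = (pr.2.toList.length : Int) := by
    intro pr; simp [hkey, PySem.Str.len_eq]
  have hqn_toList : ∀ n pr, qn n pr = true ↔ pr.2.toList = fp.toList.take n := by
    intro n pr
    simp only [hqn, beq_iff_eq]
    constructor
    · intro h; rw [h]; simp
    · intro h; apply String.toList_inj.mp; simpa using h
  cases h : (pvOrderN fp).find? (fun n => ((cp.find? (qn n)).map (·.1)).isSome) with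
  | none =>
    have hall := List.find?_eq_none.mp h
    have hA : L.find? (pvMatchA fp) = none := by
      apply List.find?_eq_none.mpr
      intro pr hpr hm
      obtain ⟨n, hn, htake⟩ := (pvMatchA_iff fp pr).mp hm
      refine hall n hn ?_
      have hpr' : pr ∈ cp := (PySem.List.mem_sorted cp key true pr).mp hpr
      have : cp.find? (qn n) ≠ none := by
        intro hnone
        exact absurd ((hqn_toList n pr).mpr htake) (by simpa using List.find?_eq_none.mp hnone pr hpr')
      simpa [Option.isSome_iff_ne_none] using this
    rw [hA]; rfl
  | some c =>
    have hcmem : c ∈ pvOrderN fp := List.mem_of_find?_eq_some h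
    have hcle : c ≤ fp.toList.length := pvOrderN_le fp c hcmem
    have hchit := List.find?_some h
    have htakelen : (fp.toList.take c).length = c := by rw [List.length_take]; omega
    have h5 : ∀ a, qn c a = true → key a = (c : Int) := by
      intro a ha
      rw [hkeylen, (hqn_toList c a).mp ha, htakelen]
    have h1 : ∀ a, qn c a = true → pvMatchA fp a = true := by
      intro a ha
      exact (pvMatchA_iff fp a).mpr ⟨c, hcmem, (hqn_toList c a).mp ha⟩
    have h2 : ∀ a ∈ L, pvMatchA fp a = true → key a ≤ (c : Int) := by
      intro a haL hm
      obtain ⟨n, hn, htake⟩ := (pvMatchA_iff fp a).mp hm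
      have hlen := pvMatch_len fp a hn htake
      have ha' : a ∈ cp := (PySem.List.mem_sorted cp key true a).mp haL
      have hhit : ((cp.find? (qn n)).map (·.1)).isSome = true := by
        have : cp.find? (qn n) ≠ none := by
          intro hnone
          exact absurd ((hqn_toList n a).mpr htake) (by simpa using List.find?_eq_none.mp hnone a ha')
        simpa [Option.isSome_iff_ne_none] using this
      have := pvFind?_desc_max (pvOrderN fp) _ c (pvOrderN_desc fp) h n hn hhit
      rw [hkeylen, hlen]
      exact_mod_cast this
    have h3 : ∀ a ∈ L, pvMatchA fp a = true → key a = (c : Int) → qn c a = true := by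
      intro a haL hm hk
      obtain ⟨n, hn, htake⟩ := (pvMatchA_iff fp a).mp hm
      have hlen := pvMatch_len fp a hn htake
      have : n = c := by
        rw [hkeylen, hlen] at hk
        exact_mod_cast hk
      exact (hqn_toList c a).mpr (this ▸ htake)
    have h4 : ∃ a ∈ L, qn c a = true := by
      obtain ⟨a, b, hmem, hq⟩ : ∃ a b, (a, b) ∈ cp ∧ qn c (a, b) = true := by simpa using hchit
      exact ⟨(a, b), (PySem.List.mem_sorted cp key true _).mpr hmem, hq⟩
    have hconst : ∀ a b, qn c a = true → qn c b = true → key a = key b := by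
      intro a b ha hb; rw [h5 a ha, h5 b hb]
    have hPW : L.Pairwise (fun a b => key b ≤ key a) := PySem.List.sorted_pairwise_rev cp key
    rw [pvFind?_class key (pvMatchA fp) (qn c) (c : Int) L hPW h1 h5 h2 h3 h4]
    rw [← List.head?_filter, hL, pvFilter_sorted_rev cp key (qn c) hconst, List.head?_filter]
    rfl

-- the two programs agree on every input
lemma pvMain (changed_files : List String) (crate_paths : List (String × String)) :
    map_files_to_crates changed_files crate_paths = map_files_to_crates_alt changed_files crate_paths := by
  unfold map_files_to_crates map_files_to_crates_alt
  simp only []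
  congr 1
  refine congrArg (fun f => List.foldl f PySem.Dict.empty changed_files) ?_
  funext d fp
  have hB : (PySem.Str.len fp :: ((PySem.List.pyRange 0 (PySem.Str.len fp) 1).filter (fun i => PySem.Str.pyGet? fp i == some '/')).reverse).findSome?
        (fun c => (crate_paths.foldl (fun m pr => if m.contains pr.2 then m else m.insert pr.2 pr.1) PySem.Dict.empty).get? (PySem.Str.slice fp none (some c)))
      = ((PySem.List.sorted crate_paths (fun x => PySem.Str.len x.2) true).find? (pvMatchA fp)).map (·.1) := by
    rw [pvOrder_eq, List.findSome?_map]
    have hfun : ((fun c => (crate_paths.foldl (fun m pr => if m.contains pr.2 then m else m.insert pr.2 pr.1) PySem.Dict.empty).get? (PySem.Str.slice fp none (some c))) ∘ (fun (n : Nat) => (n : Int)))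
        = fun n => (crate_paths.find? (fun pr => pr.2 == String.ofList (fp.toList.take n))).map (·.1) := by
      funext n
      simp only [Function.comp]
      rw [pvSlice_take, pvDirmap_get, PySem.Dict.get?_empty, Option.none_or]
    rw [hfun, ← pvChoice_eq]
  show (match (PySem.List.sorted crate_paths (fun x => PySem.Str.len x.2) true).find? (pvMatchA fp) with
      | some pr => d.modify pr.1 [] (fun l => l ++ [fp])
      | none => d) = (match (PySem.Str.len fp :: ((PySem.List.pyRange 0 (PySem.Str.len fp) 1).filter (fun i => PySem.Str.pyGet? fp i == some '/')).reverse).findSome?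
        (fun c => (crate_paths.foldl (fun m pr => if m.contains pr.2 then m else m.insert pr.2 pr.1) PySem.Dict.empty).get? (PySem.Str.slice fp none (some c))) with
      | some name => d.insert name (d.getD name [] ++ [fp])
      | none => d)
  rw [hB]
  cases (PySem.List.sorted crate_paths (fun x => PySem.Str.len x.2) true).find? (pvMatchA fp) with
  | none => rfl
  | some pr => rfl

-- ===== VERDICT (by name: the statement is the Claim_ definition above) =====
theorem map_files_to_crates_spec : Claim_equal_map_files_to_crates := by
  intro changed_files crate_paths _
  exact pvMain changed_files crate_paths
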